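-- pv_equiv track=rewrite | github.com/pypi-data/pypi-mirror-208 | packages/rexactor/rexactor-1.0-py3-none-any.whl/trex.py | find_prefixes
-- ===== SOURCE A (Python) =====
-- from collections import OrderedDict
--
-- def track_token_positions(input_data, tokens):
--     positions = []
--     # loop through the inputs
--     for input_string in input_data:
--         position_dictionary = OrderedDict()
--         # loop through the tokens
--         for token in tokens:
--             if token in input_string:
--                 position_dictionary[input_string.index(token)] = token;
--         positions.append(position_dictionary);
--     return positions
--
-- def find_prefixes(input_data, tokens):
--     positions = track_token_positions(input_data, tokens)
--     prefixes = {}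
--     for dictionary in positions:
--         if 0 not in dictionary.keys():
--             continue
--         prefixes[dictionary[0]] = 1
--     return list(prefixes.keys())
--
--     # We may want to count prefixes which cover a vast majority of cases instead of all,
--     # so this code allows a noise threshold.
--     count = 0
--     empty_list = []
--     for prefix in prefixes:
--         count += tokens[prefix]
--         if (len(input_data) - count)/len(input_data) > 0.01:
--             return empty_list
--         else:
--             return list(prefixes.keys())
-- ===== SOURCE B (Python) =====
-- def find_prefixes(input_data, tokens):
--     # For each input string, the token A keeps is the LAST token (in tokens
--     # order) that occurs at index 0, i.e. the last token the string starts
--     # with.  So scan the tokens in reverse and stop at the first prefix hit;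
--     # collect results in first-seen order without duplicates.
--     rev = tokens[::-1]
--     out = []
--     for s in input_data:
--         for t in rev:
--             if s.startswith(t):
--                 if t not in out:
--                     out.append(t)
--                 break
--     return out
-- ===== Notes on version B (the rewrite author's own statement) =====
-- stated objective: faster
-- what changed: A builds, for every input string, a dictionary mapping the first occurrence position of every token occurring anywhere in it and then reads key 0; B just scans the tokens in reverse and stops at the first startswith hit, collecting results directly with no dictionaries or substring searches.
import Mathlib
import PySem

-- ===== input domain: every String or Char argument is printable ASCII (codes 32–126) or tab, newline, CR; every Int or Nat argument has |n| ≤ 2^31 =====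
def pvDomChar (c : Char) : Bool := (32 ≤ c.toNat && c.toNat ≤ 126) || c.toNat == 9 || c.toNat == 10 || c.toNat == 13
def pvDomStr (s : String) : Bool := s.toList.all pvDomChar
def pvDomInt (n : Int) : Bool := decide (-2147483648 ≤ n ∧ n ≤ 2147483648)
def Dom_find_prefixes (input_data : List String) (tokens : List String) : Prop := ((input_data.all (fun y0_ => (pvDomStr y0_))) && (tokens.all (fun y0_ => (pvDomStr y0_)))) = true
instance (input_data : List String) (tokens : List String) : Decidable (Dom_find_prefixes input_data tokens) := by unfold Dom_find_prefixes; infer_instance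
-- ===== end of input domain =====

-- B replaces A's per-input position dictionaries (a substring search for every
-- token) by a reversed token scan that stops at the first prefix hit; same
-- return value everywhere (alternative decomposition).

-- ===== PORT A =====
def track_token_positions (input_data : List String) (tokens : List String) :
    List (PySem.Dict Int String) :=
  input_data.foldl (fun positions input_string =>
    positions ++ [tokens.foldl (fun d token =>
      if PySem.Str.isIn token input_string then
        d.insert (PySem.Str.find input_string token) token   -- index guarded by `in`: find is exact here
      else d) PySem.Dict.empty]) []

def find_prefixes (input_data : List String) (tokens : List String) : List String :=
  let positions := track_token_positions input_data tokens
  (positions.foldl (fun prefixes dictionary =>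
      match dictionary.get? 0 with           -- `if 0 not in dictionary.keys(): continue; prefixes[dictionary[0]] = 1`
      | none => prefixes
      | some v => prefixes.insert v 1) (PySem.Dict.empty : PySem.Dict String Int)).keys

-- ===== PORT B =====
-- inner `for t in rev: if s.startswith(t): …; break` loop of Source B
def pvPick (s : String) : List String → List String → List String
  | [], out => out
  | t :: rest, out =>
    if PySem.Str.startswith s t then
      (if t ∈ out then out else out ++ [t])
    else pvPick s rest out

def find_prefixes_alt (input_data : List String) (tokens : List String) : List String :=
  let rev := tokens.reverse
  input_data.foldl (fun out s => pvPick s rev out) []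

-- ===== PRECONDITION & SPEC =====
def Spec_find_prefixes (input_data : List String) (tokens : List String) (out : List String) : Prop := out = find_prefixes_alt input_data tokens
instance (input_data : List String) (tokens : List String) (out : List String) : Decidable (Spec_find_prefixes input_data tokens out) := by unfold Spec_find_prefixes; infer_instance

-- ===== CLAIM (what is proved, stated in full; the proofs are below) =====
def Claim_equal_find_prefixes : Prop := ∀ (input_data : List String) (tokens : List String), Dom_find_prefixes input_data tokens → Spec_find_prefixes input_data tokens (find_prefixes input_data tokens)

-- ===== LEMMAS AND PROOFS =====

-- a token sits at index 0 of s exactly when it is a prefix of s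
theorem chars_pref_iff (S T : List Char) :
    T <+: S ↔ (T <:+: S ∧ PySem.Chars.find S T = 0) := by
  constructor
  · intro h
    have hinf : T <:+: S := h.isInfix
    have hnn : 0 ≤ PySem.Chars.find S T := (PySem.Chars.find_nonneg_iff S T).2 hinf
    refine ⟨hinf, ?_⟩
    by_contra hne
    have hpos : 0 < (PySem.Chars.find S T).toNat := by omega
    have := (PySem.Chars.find_spec (s := S) (sub := T) hnn).2 0 hpos
    simp at this
    exact this h
  · rintro ⟨hinf, hz⟩
    have hnn : 0 ≤ PySem.Chars.find S T := by omega
    have := (PySem.Chars.find_spec (s := S) (sub := T) hnn).1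
    rw [hz] at this
    simpa using this

-- `s.startswith(t)` is exactly A's test `t in s and s.index(t) == 0`
theorem startswith_iff_find_zero (s t : String) :
    PySem.Str.startswith s t = true ↔
      (PySem.Str.isIn t s = true ∧ PySem.Str.find s t = 0) := by
  rw [PySem.Str.startswith_eq, PySem.Str.isIn_eq, PySem.Str.find_eq,
    PySem.Chars.startswith_iff, PySem.Chars.isIn_iff_infix]
  exact chars_pref_iff s.toList t.toList

-- B's break-loop returns the first hit of the reversed token list
theorem pvPick_eq (s : String) (l out : List String) :
    pvPick s l out =
      match l.find? (fun t => PySem.Str.startswith s t) with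
      | none => out
      | some t => if t ∈ out then out else out ++ [t] := by
  induction l with
  | nil => simp [pvPick]
  | cons t rest ih =>
    rw [pvPick, List.find?_cons]
    cases h : PySem.Str.startswith s t with
    | true => simp
    | false => simpa [h] using ih

theorem step_get0 (s t : String) (d : PySem.Dict Int String) :
    ((if PySem.Str.isIn t s then d.insert (PySem.Str.find s t) t else d).get? 0) =
      if PySem.Str.startswith s t then some t else d.get? 0 := by
  by_cases h : PySem.Str.startswith s t
  · obtain ⟨h1, h2⟩ := (startswith_iff_find_zero s t).1 h
    rw [if_pos h1, if_pos h, h2, PySem.Dict.get?_insert_self]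
  · by_cases h1 : PySem.Str.isIn t s = true
    · have h2 : PySem.Str.find s t ≠ 0 := by
        intro hz
        exact h ((startswith_iff_find_zero s t).2 ⟨h1, hz⟩)
      rw [if_pos h1, if_neg (by simpa using h),
        PySem.Dict.get?_insert_of_ne _ _ (fun he => h2 he.symm)]
    · rw [if_neg h1, if_neg (by simpa using h)]

-- A's per-input dict, looked up at key 0, is the last prefix token = B's first reversed hit
theorem dict_get0 (s : String) (tokens : List String) (d : PySem.Dict Int String) :
    (tokens.foldl (fun d token =>
        if PySem.Str.isIn token s then
          d.insert (PySem.Str.find s token) token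
        else d) d).get? 0 =
      match tokens.reverse.find? (fun t => PySem.Str.startswith s t) with
      | some t => some t
      | none => d.get? 0 := by
  induction tokens generalizing d with
  | nil => simp
  | cons t rest ih =>
    rw [List.foldl_cons, ih, List.reverse_cons, List.find?_append]
    cases hr : rest.reverse.find? (fun t => PySem.Str.startswith s t) with
    | some u => simp
    | none =>
      rw [step_get0, List.find?_singleton]
      cases h : PySem.Str.startswith s t <;> simp

-- inserting `v ↦ 1` into A's result dict updates its key list like B's `append if new`
theorem keys_insert_set (pre : PySem.Dict String Int) (v : String) :
    (pre.insert v 1).keys = if v ∈ pre.keys then pre.keys else pre.keys ++ [v] := by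
  by_cases hv : v ∈ pre.keys
  · rw [if_pos hv, PySem.Dict.keys_insert_of_contains]
    exact (PySem.Dict.contains_iff_mem_keys pre v).2 hv
  · rw [if_neg hv, PySem.Dict.keys_insert_of_not_contains]
    simpa using (fun hc => hv ((PySem.Dict.contains_iff_mem_keys pre v).1 hc))

theorem main_loop (tokens : List String) (inputs : List String)
    (pre : PySem.Dict String Int) (out : List String) (h : pre.keys = out) :
    (inputs.foldl (fun prefixes s =>
        match (tokens.foldl (fun d token =>
            if PySem.Str.isIn token s then
              d.insert (PySem.Str.find s token) token
            else d) PySem.Dict.empty).get? 0 with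
        | none => prefixes
        | some v => prefixes.insert v 1) pre).keys =
      inputs.foldl (fun out s => pvPick s tokens.reverse out) out := by
  induction inputs generalizing pre out with
  | nil => exact h
  | cons s rest ih =>
    rw [List.foldl_cons, List.foldl_cons]
    have e1 := dict_get0 s tokens PySem.Dict.empty
    rw [PySem.Dict.get?_empty] at e1
    rw [pvPick_eq]
    cases hf : tokens.reverse.find? (fun t => PySem.Str.startswith s t) with
    | none =>
      rw [hf] at e1
      simp only [e1]
      exact ih pre out h
    | some v =>
      rw [hf] at e1
      simp only [e1]
      apply ih
      rw [keys_insert_set, h]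

-- ===== VERDICT (by name: the statement is the Claim_ definition above) =====
theorem find_prefixes_spec : Claim_equal_find_prefixes := by
  intro input_data tokens _
  unfold Spec_find_prefixes find_prefixes find_prefixes_alt track_token_positions
  simp only [PySem.List.foldl_append_singleton_eq_map, List.nil_append, List.foldl_map]
  exact main_loop tokens input_data PySem.Dict.empty [] rfl
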